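-- pv_equiv track=rewrite | github.com/fei7fei/Exuvia-Counting | exuvia_app/app.py | estimate_tile_count
-- ===== SOURCE A (Python) =====
-- def estimate_tile_count(width, height, tile_size, overlap):
--     """Estimate tile count using the same stepping logic as ImageTiler."""
--     stride = max(1, tile_size - overlap)
--     coords = set()
--
--     for y in range(0, max(1, height - tile_size + 1), stride):
--         for x in range(0, max(1, width - tile_size + 1), stride):
--             if x + tile_size <= width and y + tile_size <= height:
--                 coords.add((x, y))
--
--     if width % stride != 0 and width >= tile_size:
--         x = width - tile_size
--         for y in range(0, max(1, height - tile_size + 1), stride):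
--             if y + tile_size <= height:
--                 coords.add((x, y))
--
--     if height % stride != 0 and height >= tile_size:
--         y = height - tile_size
--         for x in range(0, max(1, width - tile_size + 1), stride):
--             if x + tile_size <= width:
--                 coords.add((x, y))
--
--     if width % stride != 0 and height % stride != 0 and width >= tile_size and height >= tile_size:
--         coords.add((width - tile_size, height - tile_size))
--
--     return len(coords)
-- ===== SOURCE B (Python) =====
-- def estimate_tile_count(width, height, tile_size, overlap):
--     """Closed-form: independent counts of distinct x- and y-positions, multiplied."""
--     stride = max(1, tile_size - overlap)
--
--     def axis_positions(extent):
--         if extent < tile_size: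
--             return 0
--         count = (extent - tile_size) // stride + 1
--         if extent % stride != 0 and (extent - tile_size) % stride != 0:
--             count += 1  # the snapped-to-edge position is new
--         return count
--
--     return axis_positions(width) * axis_positions(height)
-- ===== Notes on version B (the rewrite author's own statement) =====
-- stated objective: alternative
-- what changed: Replaces A's nested sweep over the whole stride grid (building a set of (x,y) coordinates and counting it) with a closed-form arithmetic count of distinct positions per axis, multiplied for the two axes.
import Mathlib
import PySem

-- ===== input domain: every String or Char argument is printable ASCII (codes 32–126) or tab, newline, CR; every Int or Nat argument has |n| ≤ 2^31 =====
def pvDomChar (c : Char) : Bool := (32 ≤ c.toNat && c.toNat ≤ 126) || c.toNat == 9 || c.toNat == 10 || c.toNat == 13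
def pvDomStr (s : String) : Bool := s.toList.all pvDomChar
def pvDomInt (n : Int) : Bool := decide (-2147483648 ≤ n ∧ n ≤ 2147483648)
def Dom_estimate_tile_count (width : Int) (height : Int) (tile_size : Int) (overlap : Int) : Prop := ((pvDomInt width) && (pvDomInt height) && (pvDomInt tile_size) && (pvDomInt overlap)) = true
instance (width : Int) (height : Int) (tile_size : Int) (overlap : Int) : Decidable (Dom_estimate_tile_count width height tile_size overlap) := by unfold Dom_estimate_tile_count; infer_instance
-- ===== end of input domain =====

-- B replaces A's nested sweep over the whole step grid (collecting coordinates in a set)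
-- by a closed-form arithmetic count per axis (distinct x-positions times distinct y-positions).

-- ===== PORT A =====
def estimate_tile_count (width : Int) (height : Int) (tile_size : Int) (overlap : Int) : Int :=
  let stride := max 1 (tile_size - overlap)
  let coords : PySem.Set (Int × Int) :=
    (PySem.List.pyRange 0 (max 1 (height - tile_size + 1)) stride).foldl
      (fun c y =>
        (PySem.List.pyRange 0 (max 1 (width - tile_size + 1)) stride).foldl
          (fun c x =>
            if x + tile_size ≤ width ∧ y + tile_size ≤ height then PySem.Set.add c (x, y) else c)
          c)
      PySem.Set.empty
  let coords :=
    if PySem.Int.mod width stride ≠ 0 ∧ tile_size ≤ width then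
      let x := width - tile_size
      (PySem.List.pyRange 0 (max 1 (height - tile_size + 1)) stride).foldl
        (fun c y => if y + tile_size ≤ height then PySem.Set.add c (x, y) else c) coords
    else coords
  let coords :=
    if PySem.Int.mod height stride ≠ 0 ∧ tile_size ≤ height then
      let y := height - tile_size
      (PySem.List.pyRange 0 (max 1 (width - tile_size + 1)) stride).foldl
        (fun c x => if x + tile_size ≤ width then PySem.Set.add c (x, y) else c) coords
    else coords
  let coords :=
    if PySem.Int.mod width stride ≠ 0 ∧ PySem.Int.mod height stride ≠ 0 ∧
        tile_size ≤ width ∧ tile_size ≤ height then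
      PySem.Set.add coords (width - tile_size, height - tile_size)
    else coords
  PySem.Set.len coords

-- ===== PORT B =====
-- number of distinct tile positions along one axis of the given extent
def pvAxisPositions (tile_size : Int) (stride : Int) (extent : Int) : Int :=
  if extent < tile_size then 0
  else
    let count := PySem.Int.floordiv (extent - tile_size) stride + 1
    if PySem.Int.mod extent stride ≠ 0 ∧ PySem.Int.mod (extent - tile_size) stride ≠ 0 then
      count + 1
    else count

def estimate_tile_count_alt (width : Int) (height : Int) (tile_size : Int) (overlap : Int) : Int :=
  let stride := max 1 (tile_size - overlap)
  pvAxisPositions tile_size stride width * pvAxisPositions tile_size stride height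

-- ===== PRECONDITION & SPEC =====
def Spec_estimate_tile_count (width : Int) (height : Int) (tile_size : Int) (overlap : Int) (out : Int) : Prop := out = estimate_tile_count_alt width height tile_size overlap
instance (width : Int) (height : Int) (tile_size : Int) (overlap : Int) (out : Int) : Decidable (Spec_estimate_tile_count width height tile_size overlap out) := by unfold Spec_estimate_tile_count; infer_instance

-- ===== CLAIM (what is proved, stated in full; the proofs are below) =====
def Claim_equal_estimate_tile_count : Prop := ∀ (width : Int) (height : Int) (tile_size : Int) (overlap : Int), Dom_estimate_tile_count width height tile_size overlap → Spec_estimate_tile_count width height tile_size overlap (estimate_tile_count width height tile_size overlap)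

-- ===== LEMMAS AND PROOFS =====

-- folding Set.add of fresh, pairwise-distinct elements appends them all
lemma pv_fold_add_fresh {α : Type} [BEq α] [LawfulBEq α] (g : Int → α) :
    ∀ (xs : List Int) (c : List α), (xs.map g).Nodup → (∀ x ∈ xs, g x ∉ c) →
      xs.foldl (fun c x => PySem.Set.add c (g x)) c = c ++ xs.map g := by
  intro xs
  induction xs with
  | nil => intro c _ _; simp
  | cons x xs ih =>
    intro c hnd hfresh
    simp only [List.map_cons, List.nodup_cons] at hnd
    have hx : g x ∉ c := hfresh x (by simp)
    have : PySem.Set.add c (g x) = c ++ [g x] := by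
      simp [PySem.Set.add, PySem.Set.contains, hx]
    simp only [List.foldl_cons, this]
    rw [ih (c ++ [g x]) hnd.2]
    · simp
    · intro z hz
      simp only [List.mem_append, List.mem_singleton, not_or]
      exact ⟨hfresh z (by simp [hz]), fun h => hnd.1 (h ▸ List.mem_map_of_mem hz)⟩

-- folding Set.add of already-present elements is a no-op
lemma pv_fold_add_stale {α : Type} [BEq α] [LawfulBEq α] (g : Int → α) :
    ∀ (xs : List Int) (c : List α), (∀ x ∈ xs, g x ∈ c) →
      xs.foldl (fun c x => PySem.Set.add c (g x)) c = c := by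
  intro xs
  induction xs with
  | nil => intro c _; simp
  | cons x xs ih =>
    intro c hmem
    have hx : g x ∈ c := hmem x (by simp)
    have : PySem.Set.add c (g x) = c := by
      simp [PySem.Set.add, PySem.Set.contains, hx]
    simp only [List.foldl_cons, this]
    exact ih c (fun z hz => hmem z (by simp [hz]))

-- the nested product loop builds exactly the grid of pairs
lemma pv_fold_prod (xs : List Int) (hx : xs.Nodup) :
    ∀ (ys : List Int) (c : List (Int × Int)), ys.Nodup → (∀ p ∈ c, p.2 ∉ ys) →
      ys.foldl (fun c y => xs.foldl (fun c x => PySem.Set.add c (x, y)) c) c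
        = c ++ ys.flatMap (fun y => xs.map (fun x => (x, y))) := by
  intro ys
  induction ys with
  | nil => intro c _ _; simp
  | cons y ys ih =>
    intro c hnd hfresh
    simp only [List.nodup_cons] at hnd
    have hstep : xs.foldl (fun c x => PySem.Set.add c (x, y)) c
        = c ++ xs.map (fun x => (x, y)) := by
      apply pv_fold_add_fresh
      · exact hx.map (fun a b h => by simpa using congrArg Prod.fst h)
      · intro x hxm hc
        exact hfresh _ hc (by simp)
    simp only [List.foldl_cons, hstep]
    rw [ih _ hnd.2 ?_]
    · simp
    · intro p hp
      rcases List.mem_append.mp hp with h | h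
      · exact fun hy => hfresh p h (by simp [hy])
      · rcases List.mem_map.mp h with ⟨x, _, rfl⟩
        simpa using hnd.1

-- membership in the grid list
lemma pv_mem_grid (xs ys : List Int) (p : Int × Int) :
    p ∈ ys.flatMap (fun y => xs.map (fun x => (x, y))) ↔ p.1 ∈ xs ∧ p.2 ∈ ys := by
  rcases p with ⟨a, b⟩
  simp only [List.mem_flatMap, List.mem_map, Prod.mk.injEq]
  constructor
  · rintro ⟨y, hy, x, hx, rfl, rfl⟩; exact ⟨hx, hy⟩
  · rintro ⟨ha, hb⟩; exact ⟨b, hb, a, ha, rfl, rfl⟩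

lemma pv_len_grid (xs ys : List Int) :
    (ys.flatMap (fun y => xs.map (fun x => (x, y)))).length = ys.length * xs.length := by
  rw [List.length_flatMap]
  simp only [List.length_map]
  exact PySem.List.sum_map_const_nat ys xs.length

-- the stepped range: membership, nodup, length
lemma pv_mem_R {s : Int} (hs : 0 < s) (b x : Int) :
    x ∈ PySem.List.pyRange 0 b s ↔ 0 ≤ x ∧ x < b ∧ s ∣ x := by
  rw [PySem.List.mem_pyRange_iff_of_pos hs]
  simp

lemma pv_nodup_R {s : Int} (hs : 0 < s) (b : Int) :
    (PySem.List.pyRange 0 b s).Nodup := by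
  rw [PySem.List.pyRange_of_pos 0 b hs]
  refine List.Nodup.map ?_ (List.nodup_range)
  intro a b h
  simp only [] at h
  have : s * (a : Int) = s * b := by omega
  exact_mod_cast mul_left_cancel₀ (by omega : s ≠ 0) this

lemma pv_len_R {s : Int} (hs : 0 < s) (ts n : Int) (h : ts ≤ n) :
    ((PySem.List.pyRange 0 (max 1 (n - ts + 1)) s).length : Int) = (n - ts) / s + 1 := by
  rw [PySem.List.pyRange_of_pos 0 _ hs]
  have hmax : max 1 (n - ts + 1) = n - ts + 1 := by omega
  rw [hmax, if_pos (by omega : (0:Int) < n - ts + 1)]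
  have h1 : (n - ts + 1 - 0 + s - 1) = (n - ts) + 1 * s := by ring
  rw [List.length_map, List.length_range, h1, Int.add_mul_ediv_right _ _ (by omega : s ≠ 0)]
  have h2 : 0 ≤ (n - ts) / s := Int.ediv_nonneg (by omega) (by omega)
  omega

-- a guarded fold whose guard is always false does nothing
lemma pv_fold_if_false {α β : Type} (l : List α) (p : α → Prop) [DecidablePred p]
    (f : List β → α → List β) (c : List β) (h : ∀ x ∈ l, ¬ p x) :
    l.foldl (fun c x => if p x then f c x else c) c = c := by
  rw [PySem.List.foldl_congr_mem l _ (fun c _ => c) c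
    (fun acc x hx => by rw [if_neg (h x hx)])]
  exact List.foldl_fixed l

-- A-side value is 0 as soon as the tile does not fit in one direction
lemma pv_A_degenerate (w h ts ov : Int) (hd : w < ts ∨ h < ts) :
    estimate_tile_count w h ts ov = 0 := by
  unfold estimate_tile_count
  dsimp only
  set s : Int := max 1 (ts - ov) with hsdef
  have hs : 0 < s := lt_of_lt_of_le one_pos (le_max_left _ _)
  have hmain :
      (PySem.List.pyRange 0 (max 1 (h - ts + 1)) s).foldl
        (fun c y =>
          (PySem.List.pyRange 0 (max 1 (w - ts + 1)) s).foldl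
            (fun c x =>
              if x + ts ≤ w ∧ y + ts ≤ h then PySem.Set.add c (x, y) else c) c)
        PySem.Set.empty = PySem.Set.empty := by
    rw [PySem.List.foldl_congr_mem _ _ (fun c _ => c) _ ?_]
    · exact List.foldl_fixed _
    · intro acc y hy
      have hy0 : 0 ≤ y := ((pv_mem_R hs _ y).mp hy).1
      apply pv_fold_if_false
      intro x hx
      have hx0 : 0 ≤ x := ((pv_mem_R hs _ x).mp hx).1
      rintro ⟨h1, h2⟩
      omega
  rw [hmain]
  have hcol :
      (if PySem.Int.mod w s ≠ 0 ∧ ts ≤ w then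
        (PySem.List.pyRange 0 (max 1 (h - ts + 1)) s).foldl
          (fun c y => if y + ts ≤ h then PySem.Set.add c (w - ts, y) else c)
          PySem.Set.empty
      else PySem.Set.empty) = PySem.Set.empty := by
    split_ifs with hc
    · apply pv_fold_if_false
      intro y hy
      have hy0 : 0 ≤ y := ((pv_mem_R hs _ y).mp hy).1
      omega
    · rfl
  rw [hcol]
  have hrow :
      (if PySem.Int.mod h s ≠ 0 ∧ ts ≤ h then
        (PySem.List.pyRange 0 (max 1 (w - ts + 1)) s).foldl
          (fun c x => if x + ts ≤ w then PySem.Set.add c (x, h - ts) else c)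
          PySem.Set.empty
      else PySem.Set.empty) = PySem.Set.empty := by
    split_ifs with hc
    · apply pv_fold_if_false
      intro x hx
      have hx0 : 0 ≤ x := ((pv_mem_R hs _ x).mp hx).1
      omega
    · rfl
  rw [hrow]
  rw [if_neg (by rintro ⟨-, -, h1, h2⟩; omega)]
  simp [PySem.Set.len, PySem.Set.empty]

-- ===== VERDICT (by name: the statement is the Claim_ definition above) =====
theorem estimate_tile_count_spec : Claim_equal_estimate_tile_count := by
  intro w h ts ov _
  unfold Spec_estimate_tile_count
  by_cases hw : ts ≤ w
  swap
  · rw [pv_A_degenerate w h ts ov (Or.inl (by omega))]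
    unfold estimate_tile_count_alt pvAxisPositions
    dsimp only
    rw [if_pos (by omega : w < ts)]
    ring
  by_cases hh : ts ≤ h
  swap
  · rw [pv_A_degenerate w h ts ov (Or.inr (by omega))]
    unfold estimate_tile_count_alt pvAxisPositions
    dsimp only
    rw [if_pos (by omega : h < ts)]
    ring
  -- main case: the tile fits in both directions
  unfold estimate_tile_count estimate_tile_count_alt
  dsimp only
  set s : Int := max 1 (ts - ov) with hsdef
  have hs : 0 < s := lt_of_lt_of_le one_pos (le_max_left _ _)
  set xs := PySem.List.pyRange 0 (max 1 (w - ts + 1)) s with hxsdef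
  set ys := PySem.List.pyRange 0 (max 1 (h - ts + 1)) s with hysdef
  have hmaxw : max 1 (w - ts + 1) = w - ts + 1 := by omega
  have hmaxh : max 1 (h - ts + 1) = h - ts + 1 := by omega
  have hxnd : xs.Nodup := pv_nodup_R hs _
  have hynd : ys.Nodup := pv_nodup_R hs _
  have hmemxs : ∀ x ∈ xs, 0 ≤ x ∧ x ≤ w - ts := by
    intro x hx
    have := (pv_mem_R hs _ x).mp hx
    omega
  have hmemys : ∀ y ∈ ys, 0 ≤ y ∧ y ≤ h - ts := by
    intro y hy
    have := (pv_mem_R hs _ y).mp hy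
    omega
  have hwmem : (w - ts) ∈ xs ↔ s ∣ (w - ts) := by
    rw [hxsdef, pv_mem_R hs]
    constructor
    · exact fun h => h.2.2
    · exact fun h => ⟨by omega, by omega, h⟩
  have hhmem : (h - ts) ∈ ys ↔ s ∣ (h - ts) := by
    rw [hysdef, pv_mem_R hs]
    constructor
    · exact fun h => h.2.2
    · exact fun h => ⟨by omega, by omega, h⟩
  set P := ys.flatMap (fun y => xs.map (fun x => (x, y))) with hPdef
  have hmemP : ∀ p : Int × Int, p ∈ P ↔ p.1 ∈ xs ∧ p.2 ∈ ys := fun p => pv_mem_grid xs ys p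
  -- the main double loop builds the full grid
  have hmain :
      ys.foldl (fun c y => xs.foldl
        (fun c x => if x + ts ≤ w ∧ y + ts ≤ h then PySem.Set.add c (x, y) else c) c)
        PySem.Set.empty = P := by
    rw [PySem.List.foldl_congr_mem ys _
        (fun c y => xs.foldl (fun c x => PySem.Set.add c (x, y)) c) _ ?_]
    · rw [pv_fold_prod xs hxnd ys PySem.Set.empty hynd (by intro p hp; simp [PySem.Set.empty] at hp)]
      simp [PySem.Set.empty, hPdef]
    · intro acc y hy
      rw [PySem.List.foldl_congr_mem xs _ (fun c x => PySem.Set.add c (x, y)) _ ?_]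
      intro acc' x hx
      rw [if_pos ⟨by have := hmemxs x hx; omega, by have := hmemys y hy; omega⟩]
  rw [hmain]
  set colL := ys.map (fun y => ((w - ts : Int), y)) with hcolLdef
  set rowL := xs.map (fun x => (x, (h - ts : Int))) with hrowLdef
  -- column pass
  have hcol :
      (if PySem.Int.mod w s ≠ 0 ∧ ts ≤ w then
        ys.foldl (fun c y => if y + ts ≤ h then PySem.Set.add c (w - ts, y) else c) P
      else P)
      = P ++ (if PySem.Int.mod w s ≠ 0 ∧ ¬ s ∣ (w - ts) then colL else []) := by
    by_cases hwm : PySem.Int.mod w s = 0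
    · simp [hwm]
    · rw [if_pos ⟨hwm, hw⟩]
      rw [PySem.List.foldl_congr_mem ys _ (fun c y => PySem.Set.add c (w - ts, y)) _
        (fun acc y hy => by rw [if_pos (by have := hmemys y hy; omega)])]
      by_cases hdw : s ∣ (w - ts)
      · rw [pv_fold_add_stale (fun y => ((w - ts : Int), y)) ys P
          (fun y hy => (hmemP _).mpr ⟨hwmem.mpr hdw, hy⟩)]
        simp [hdw]
      · rw [pv_fold_add_fresh (fun y => ((w - ts : Int), y)) ys P
          (hynd.map (fun a b hab => by simpa using congrArg Prod.snd hab))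
          (fun y hy hc => hdw (hwmem.mp ((hmemP _).mp hc).1))]
        simp [hwm, hdw, hcolLdef]
  rw [hcol]
  set c1 := P ++ (if PySem.Int.mod w s ≠ 0 ∧ ¬ s ∣ (w - ts) then colL else []) with hc1def
  have hmemc1 : ∀ p : Int × Int, p ∈ c1 →
      p ∈ P ∨ ((PySem.Int.mod w s ≠ 0 ∧ ¬ s ∣ (w - ts)) ∧ p ∈ colL) := by
    intro p hp
    rcases List.mem_append.mp hp with hp | hp
    · exact Or.inl hp
    · split_ifs at hp with hc
      · exact Or.inr ⟨hc, hp⟩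
      · simp at hp
  -- row pass
  have hrow :
      (if PySem.Int.mod h s ≠ 0 ∧ ts ≤ h then
        xs.foldl (fun c x => if x + ts ≤ w then PySem.Set.add c (x, h - ts) else c) c1
      else c1)
      = c1 ++ (if PySem.Int.mod h s ≠ 0 ∧ ¬ s ∣ (h - ts) then rowL else []) := by
    by_cases hhm : PySem.Int.mod h s = 0
    · simp [hhm]
    · rw [if_pos ⟨hhm, hh⟩]
      rw [PySem.List.foldl_congr_mem xs _ (fun c x => PySem.Set.add c (x, h - ts)) _
        (fun acc x hx => by rw [if_pos (by have := hmemxs x hx; omega)])]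
      by_cases hdh : s ∣ (h - ts)
      · rw [pv_fold_add_stale (fun x => (x, (h - ts : Int))) xs c1
          (fun x hx => List.mem_append_left _ ((hmemP _).mpr ⟨hx, hhmem.mpr hdh⟩))]
        simp [hdh]
      · rw [pv_fold_add_fresh (fun x => (x, (h - ts : Int))) xs c1
          (hxnd.map (fun a b hab => by simpa using congrArg Prod.fst hab)) ?_]
        · simp [hhm, hdh, hrowLdef]
        · intro x hx hc
          rcases hmemc1 _ hc with hp | ⟨-, hp⟩
          · exact hdh (hhmem.mp ((hmemP _).mp hp).2)
          · rcases List.mem_map.mp hp with ⟨y, hy, hpy⟩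
            have : y = h - ts := congrArg Prod.snd hpy
            exact hdh (hhmem.mp (this ▸ hy))
  rw [hrow]
  set c2 := c1 ++ (if PySem.Int.mod h s ≠ 0 ∧ ¬ s ∣ (h - ts) then rowL else []) with hc2def
  -- corner
  have hcorner :
      (if PySem.Int.mod w s ≠ 0 ∧ PySem.Int.mod h s ≠ 0 ∧ ts ≤ w ∧ ts ≤ h then
        PySem.Set.add c2 (w - ts, h - ts)
      else c2)
      = c2 ++ (if (PySem.Int.mod w s ≠ 0 ∧ ¬ s ∣ (w - ts)) ∧
                  (PySem.Int.mod h s ≠ 0 ∧ ¬ s ∣ (h - ts)) then [((w - ts : Int), (h - ts : Int))] else []) := by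
    by_cases hwm : PySem.Int.mod w s = 0
    · simp [hwm]
    by_cases hhm : PySem.Int.mod h s = 0
    · simp [hhm]
    rw [if_pos ⟨hwm, hhm, hw, hh⟩]
    by_cases hdw : s ∣ (w - ts)
    · have hin : ((w - ts : Int), (h - ts : Int)) ∈ c2 := by
        by_cases hdh : s ∣ (h - ts)
        · exact List.mem_append_left _ (List.mem_append_left _
            ((hmemP _).mpr ⟨hwmem.mpr hdw, hhmem.mpr hdh⟩))
        · refine List.mem_append_right _ ?_
          rw [if_pos ⟨hhm, hdh⟩, hrowLdef]
          exact List.mem_map.mpr ⟨w - ts, hwmem.mpr hdw, rfl⟩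
      simp [PySem.Set.add, PySem.Set.contains, hin, hdw]
    by_cases hdh : s ∣ (h - ts)
    · have hin : ((w - ts : Int), (h - ts : Int)) ∈ c2 := by
        refine List.mem_append_left _ (List.mem_append_right _ ?_)
        rw [if_pos ⟨hwm, hdw⟩, hcolLdef]
        exact List.mem_map.mpr ⟨h - ts, hhmem.mpr hdh, rfl⟩
      simp [PySem.Set.add, PySem.Set.contains, hin, hdh]
    · have hnin : ((w - ts : Int), (h - ts : Int)) ∉ c2 := by
        intro hc
        rcases List.mem_append.mp hc with hc | hc
        · rcases hmemc1 _ hc with hp | ⟨-, hp⟩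
          · exact hdw (hwmem.mp ((hmemP _).mp hp).1)
          · rcases List.mem_map.mp hp with ⟨y, hy, hpy⟩
            have : y = h - ts := congrArg Prod.snd hpy
            exact hdh (hhmem.mp (this ▸ hy))
        · split_ifs at hc with hcond
          · rcases List.mem_map.mp hc with ⟨x, hx, hpx⟩
            have : x = w - ts := congrArg Prod.fst hpx
            exact hdw (hwmem.mp (this ▸ hx))
          · simp at hc
      simp [PySem.Set.add, PySem.Set.contains, hnin, hwm, hhm, hdw, hdh]
  rw [hcorner]
  -- lengths
  have hkx : ((xs.length : Int)) = (w - ts) / s + 1 := pv_len_R hs ts w hw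
  have hky : ((ys.length : Int)) = (h - ts) / s + 1 := pv_len_R hs ts h hh
  have hPlen : P.length = ys.length * xs.length := pv_len_grid xs ys
  have hcolLen : colL.length = ys.length := by simp [hcolLdef]
  have hrowLen : rowL.length = xs.length := by simp [hrowLdef]
  -- B side
  rw [show pvAxisPositions ts s w =
      (w - ts) / s + 1 + (if PySem.Int.mod w s ≠ 0 ∧ ¬ s ∣ (w - ts) then 1 else 0) by
    unfold pvAxisPositions
    rw [if_neg (by omega : ¬ w < ts)]
    dsimp only
    rw [PySem.Int.floordiv_eq_ediv_of_pos hs]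
    by_cases hc : PySem.Int.mod w s ≠ 0 ∧ ¬ s ∣ (w - ts)
    · rw [if_pos ⟨hc.1, by rw [Ne, PySem.Int.mod_eq_zero_iff_dvd]; exact hc.2⟩, if_pos hc]
    · have hc' : ¬(PySem.Int.mod w s ≠ 0 ∧ PySem.Int.mod (w - ts) s ≠ 0) := by
        simpa only [Ne, PySem.Int.mod_eq_zero_iff_dvd] using hc
      rw [if_neg hc', if_neg hc]
      omega]
  rw [show pvAxisPositions ts s h =
      (h - ts) / s + 1 + (if PySem.Int.mod h s ≠ 0 ∧ ¬ s ∣ (h - ts) then 1 else 0) by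
    unfold pvAxisPositions
    rw [if_neg (by omega : ¬ h < ts)]
    dsimp only
    rw [PySem.Int.floordiv_eq_ediv_of_pos hs]
    by_cases hc : PySem.Int.mod h s ≠ 0 ∧ ¬ s ∣ (h - ts)
    · rw [if_pos ⟨hc.1, by rw [Ne, PySem.Int.mod_eq_zero_iff_dvd]; exact hc.2⟩, if_pos hc]
    · have hc' : ¬(PySem.Int.mod h s ≠ 0 ∧ PySem.Int.mod (h - ts) s ≠ 0) := by
        simpa only [Ne, PySem.Int.mod_eq_zero_iff_dvd] using hc
      rw [if_neg hc', if_neg hc]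
      omega]
  rw [← hkx, ← hky]
  by_cases cw : PySem.Int.mod w s ≠ 0 ∧ ¬ s ∣ (w - ts) <;>
    by_cases ch : PySem.Int.mod h s ≠ 0 ∧ ¬ s ∣ (h - ts) <;>
      simp [PySem.Set.len, hc1def, hc2def, cw, ch, hPlen, hcolLen, hrowLen] <;>
      push_cast <;> ring
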